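-- pv_equiv track=rewrite | github.com/jer-irl/advent-2019 | sols/sol06a.py | orbits_per_node
-- ===== SOURCE A (Python) =====
-- def orbits_per_node(cache, parents, node):
--     if node == "COM":
--         return 0
--     if node in cache:
--         return cache[node]
--     parent = parents[node]
--     result = orbits_per_node(cache, parents, parent) + 1
--     cache[node] = result
--     return result
-- ===== SOURCE B (Python) =====
-- def orbits_per_node(cache, parents, node):
--     if node == "COM":
--         return 0
--     if node in cache:
--         return cache[node]
--     # walk upward iteratively, collecting the uncached path
--     path = []
--     cur = node
--     while cur != "COM" and cur not in cache:
--         path.append(cur)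
--         cur = parents[cur]
--     base = 0 if cur == "COM" else cache[cur]
--     for n in reversed(path):
--         base += 1
--         cache[n] = base
--     return base
-- ===== Notes on version B (the rewrite author's own statement) =====
-- stated objective: alternative
-- what changed: Replaces A's memoized recursion by an explicit iterative two-phase walk: collect the uncached path up to COM or a cached ancestor, then fill the cache back down the path; same cache mutations and same return value.
import Mathlib
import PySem

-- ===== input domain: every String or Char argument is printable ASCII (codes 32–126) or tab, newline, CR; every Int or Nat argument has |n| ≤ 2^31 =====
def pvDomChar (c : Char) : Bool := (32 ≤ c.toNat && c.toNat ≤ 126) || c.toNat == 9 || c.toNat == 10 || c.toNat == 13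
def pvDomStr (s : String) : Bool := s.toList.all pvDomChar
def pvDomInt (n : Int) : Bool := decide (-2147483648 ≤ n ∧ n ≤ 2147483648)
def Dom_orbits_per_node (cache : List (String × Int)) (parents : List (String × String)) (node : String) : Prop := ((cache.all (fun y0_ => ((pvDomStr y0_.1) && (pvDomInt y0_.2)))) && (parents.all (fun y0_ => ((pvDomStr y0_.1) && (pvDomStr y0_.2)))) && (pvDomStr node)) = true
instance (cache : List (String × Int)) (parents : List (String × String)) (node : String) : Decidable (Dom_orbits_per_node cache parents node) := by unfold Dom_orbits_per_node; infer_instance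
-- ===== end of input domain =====

-- B replaces A's memoized recursion by an iterative two-phase walk (collect the
-- uncached path upward, then fill values back down); equivalence is about the
-- return value — both Pythons also write the same depth values into `cache`.


-- first-match association lookup (Python dict lookup on the assoc-list encoding)
def pvLookup {ν : Type} (d : List (String × ν)) (k : String) : Option ν :=
  (d.find? (fun p => p.1 == k)).map (·.2)

-- ===== PORT A =====
-- A's recursion, fuel-bounded (fuel = parents.length + 1 suffices whenever the
-- Python terminates; cache writes happen only after all reads, so the returned
-- value does not depend on them and the cache is read-only here).
def orbitsGoA (cache : List (String × Int)) (parents : List (String × String)) :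
    Nat → String → Option Int
  | 0, _ => none
  | fuel + 1, node =>
    if node == "COM" then some 0
    else
      match pvLookup cache node with
      | some v => some v
      | none =>
        match pvLookup parents node with
        | some parent => (orbitsGoA cache parents fuel parent).map (· + 1)
        | none => none

def orbits_per_node (cache : List (String × Int)) (parents : List (String × String)) (node : String) : Int :=
  (orbitsGoA cache parents (parents.length + 1) node).getD 0

-- ===== PORT B =====
-- B's upward walk: returns the stop node (COM or a cached node) together with
-- the collected path, or none on a missing parent / exhausted fuel.
def orbitsCollectB (cache : List (String × Int)) (parents : List (String × String)) :
    Nat → String → List String → Option (String × List String)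
  | 0, _, _ => none
  | fuel + 1, cur, path =>
    if cur == "COM" || (pvLookup cache cur).isSome then some (cur, path)
    else
      match pvLookup parents cur with
      | some p => orbitsCollectB cache parents fuel p (path ++ [cur])
      | none => none

def orbits_per_node_alt (cache : List (String × Int)) (parents : List (String × String)) (node : String) : Int :=
  if node == "COM" then 0
  else
    match pvLookup cache node with
    | some v => v
    | none =>
      match orbitsCollectB cache parents (parents.length + 1) node [] with
      | some (cur, path) =>
        let base : Int := if cur == "COM" then 0 else (pvLookup cache cur).getD 0
        path.reverse.foldl (fun b _ => b + 1) base
      | none => 0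

-- ===== PRECONDITION & SPEC =====
-- Pre_ holds exactly when A returns: the parent chain from node reaches "COM"
-- or a cached node (within parents.length+1 steps, which bounds any acyclic
-- chain); excluded are exactly the inputs where A raises KeyError or recurses
-- forever on a cycle.
def pvWalkOK (cache : List (String × Int)) (parents : List (String × String)) :
    Nat → String → Bool
  | 0, _ => false
  | fuel + 1, cur =>
    cur == "COM" || (pvLookup cache cur).isSome ||
      (match pvLookup parents cur with
       | some p => pvWalkOK cache parents fuel p
       | none => false)

def Pre_orbits_per_node (cache : List (String × Int)) (parents : List (String × String)) (node : String) : Prop :=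
  pvWalkOK cache parents (parents.length + 1) node = true
instance (cache : List (String × Int)) (parents : List (String × String)) (node : String) : Decidable (Pre_orbits_per_node cache parents node) := by unfold Pre_orbits_per_node; infer_instance

def pvWitness_orbits_per_node : (List (String × Int)) × (List (String × String)) × String :=
  ([("C", 2)], [("B", "COM"), ("D", "B")], "D")

def Spec_orbits_per_node (cache : List (String × Int)) (parents : List (String × String)) (node : String) (out : Int) : Prop := out = orbits_per_node_alt cache parents node
instance (cache : List (String × Int)) (parents : List (String × String)) (node : String) (out : Int) : Decidable (Spec_orbits_per_node cache parents node out) := by unfold Spec_orbits_per_node; infer_instance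

-- ===== CLAIM (what is proved, stated in full; the proofs are below) =====
def Claim_equal_orbits_per_node : Prop := ∀ (cache : List (String × Int)) (parents : List (String × String)) (node : String), Dom_orbits_per_node cache parents node → Pre_orbits_per_node cache parents node → Spec_orbits_per_node cache parents node (orbits_per_node cache parents node)

-- ===== LEMMAS AND PROOFS =====

-- walkOK says exactly that A's fuelled recursion returns a value
theorem orbitsGoA_isSome_of_walk (cache : List (String × Int)) (parents : List (String × String)) :
    ∀ (fuel : Nat) (cur : String), pvWalkOK cache parents fuel cur = true →
      (orbitsGoA cache parents fuel cur).isSome := by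
  intro fuel
  induction fuel with
  | zero => intro cur h; simp [pvWalkOK] at h
  | succ f ih =>
    intro cur h
    simp only [pvWalkOK, Bool.or_eq_true] at h
    simp only [orbitsGoA]
    by_cases hc : cur == "COM"
    · simp [hc]
    · rw [if_neg hc]
      cases hv : pvLookup cache cur with
      | some v => simp
      | none =>
        cases hp : pvLookup parents cur with
        | none => simp [hc, hv, hp] at h
        | some p =>
          have : pvWalkOK cache parents f p = true := by
            rcases h with (h | h) | h
            · simp [hc] at h
            · simp [hv] at h
            · rw [hp] at h; exact h
          have := ih p this
          cases hg : orbitsGoA cache parents f p with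
          | none => rw [hg] at this; simp at this
          | some w => simp [hg]

-- main invariant: whenever A's recursion returns v, B's collector (with any
-- accumulated path) stops at some node and v = base(stop) + (new path).length
theorem collect_of_goA (cache : List (String × Int)) (parents : List (String × String)) :
    ∀ (fuel : Nat) (cur : String) (v : Int),
      orbitsGoA cache parents fuel cur = some v →
      ∀ (path : List String), ∃ stop rest,
        orbitsCollectB cache parents fuel cur path = some (stop, path ++ rest) ∧
        v = (if stop == "COM" then 0 else (pvLookup cache stop).getD 0) + rest.length := by
  intro fuel
  induction fuel with
  | zero => intro cur v h; simp [orbitsGoA] at h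
  | succ f ih =>
    intro cur v h path
    simp only [orbitsGoA] at h
    by_cases hc : cur == "COM"
    · refine ⟨cur, [], ?_, ?_⟩
      · simp [orbitsCollectB, hc]
      · simp [hc] at h ⊢; omega
    · rw [if_neg hc] at h
      cases hv : pvLookup cache cur with
      | some w =>
        rw [hv] at h
        refine ⟨cur, [], ?_, ?_⟩
        · simp [orbitsCollectB, hc, hv]
        · simp [hc, hv] at h ⊢; omega
      | none =>
        rw [hv] at h
        cases hp : pvLookup parents cur with
        | none => simp only [hp] at h; exact absurd h (by simp)
        | some p =>
          simp only [hp] at h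
          cases hg : orbitsGoA cache parents f p with
          | none => rw [hg] at h; simp at h
          | some w =>
            rw [hg] at h
            simp only [Option.map_some, Option.some.injEq] at h
            obtain ⟨stop, rest, hcol, hval⟩ := ih p w hg (path ++ [cur])
            refine ⟨stop, cur :: rest, ?_, ?_⟩
            · simp only [orbitsCollectB, hc, hv, Option.isSome_none, Bool.or_false,
                Bool.false_eq_true, if_false, hp]
              rw [hcol]; simp
            · subst h; rw [hval]; simp; omega

-- the reversed "base += 1" loop adds the path length
theorem foldl_add_one (base : Int) (l : List String) :
    l.foldl (fun b _ => b + 1) base = base + l.length := by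
  induction l generalizing base with
  | nil => simp
  | cons x xs ih => simp [List.foldl, ih]; omega

-- ===== VERDICT (by name: the statement is the Claim_ definition above) =====
theorem orbits_per_node_spec : Claim_equal_orbits_per_node := by
  intro cache parents node _ hpre
  unfold Spec_orbits_per_node
  have hsome := orbitsGoA_isSome_of_walk cache parents (parents.length + 1) node hpre
  cases hg : orbitsGoA cache parents (parents.length + 1) node with
  | none => rw [hg] at hsome; simp at hsome
  | some v =>
    unfold orbits_per_node orbits_per_node_alt
    rw [hg]
    by_cases hc : node == "COM"
    · have : v = 0 := by
        cases hfuel : parents.length + 1 with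
        | zero => omega
        | succ f => rw [hfuel] at hg; simp [orbitsGoA, hc] at hg; omega
      simp [hc, this]
    · rw [if_neg hc]
      cases hv : pvLookup cache node with
      | some w =>
        have : v = w := by
          cases hfuel : parents.length + 1 with
          | zero => omega
          | succ f => rw [hfuel] at hg; simp [orbitsGoA, hc, hv] at hg; omega
        simp [this]
      | none =>
        obtain ⟨stop, rest, hcol, hval⟩ := collect_of_goA cache parents _ node v hg []
        simp only [List.nil_append] at hcol
        rw [hcol]
        simp only [Option.getD_some]
        rw [foldl_add_one]
        simp [hval]
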